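-- pv_equiv track=rewrite | github.com/Huypham07/AutoDocs | back-end/src/domain/preparator/hierarchical_clustering.py | _merge_smallest_clusters
-- ===== SOURCE A (Python) =====
-- from typing import Dict
-- from typing import List
--
-- def _merge_smallest_clusters(clusters: Dict[str, List[str]], target: int) -> Dict[str, List[str]]:
--     """Merge smallest clusters to reach target count."""
--     while len(clusters) > target:
--         # Find two smallest clusters
--         sorted_clusters = sorted(clusters.items(), key=lambda x: len(x[1]))
--
--         if len(sorted_clusters) < 2:
--             break
--
--         # Merge first two smallest
--         cluster1_id, cluster1_nodes = sorted_clusters[0]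
--         cluster2_id, cluster2_nodes = sorted_clusters[1]
--
--         # Create merged cluster
--         merged_id = f'merged_{cluster1_id}_{cluster2_id}'
--         merged_nodes = cluster1_nodes + cluster2_nodes
--
--         # Remove old clusters and add merged
--         del clusters[cluster1_id]
--         del clusters[cluster2_id]
--         clusters[merged_id] = merged_nodes
--
--     return clusters
-- ===== SOURCE B (Python) =====
-- def _merge_smallest_clusters(clusters, target):
--     """Merge smallest clusters to reach target count.
--
--     Instead of re-sorting all clusters on every iteration, find the two
--     smallest clusters with a single linear scan (two-minima selection)."""
--     while len(clusters) > target and len(clusters) >= 2: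
--         items = list(clusters.items())
--         p, q = items[0], items[1]
--         b1, b2 = ((q, p) if len(q[1]) < len(p[1]) else (p, q))
--         for item in items[2:]:
--             if len(item[1]) < len(b1[1]):
--                 b1, b2 = item, b1
--             elif len(item[1]) < len(b2[1]):
--                 b2 = item
--         del clusters[b1[0]]
--         del clusters[b2[0]]
--         clusters[f'merged_{b1[0]}_{b2[0]}'] = b1[1] + b2[1]
--     return clusters
-- ===== Notes on version B (the rewrite author's own statement) =====
-- stated objective: alternative
-- what changed: Each iteration's full stable sort of all clusters is replaced by a single linear two-minima selection scan (ties broken by position, matching the stable sort), leaving the merge/delete/insert step unchanged.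
import Mathlib
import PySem

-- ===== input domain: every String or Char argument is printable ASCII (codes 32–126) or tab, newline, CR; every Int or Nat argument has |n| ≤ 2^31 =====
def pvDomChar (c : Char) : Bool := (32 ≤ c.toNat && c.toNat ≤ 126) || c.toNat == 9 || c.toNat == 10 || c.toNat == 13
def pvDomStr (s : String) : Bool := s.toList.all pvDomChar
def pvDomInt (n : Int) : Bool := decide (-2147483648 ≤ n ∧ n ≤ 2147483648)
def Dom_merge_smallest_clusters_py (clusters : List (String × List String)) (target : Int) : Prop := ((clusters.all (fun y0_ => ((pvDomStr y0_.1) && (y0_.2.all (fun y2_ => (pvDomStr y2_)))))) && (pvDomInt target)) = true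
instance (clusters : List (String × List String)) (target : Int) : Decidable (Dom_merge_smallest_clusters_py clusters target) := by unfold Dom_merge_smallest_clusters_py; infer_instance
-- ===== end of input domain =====

-- B replaces the per-iteration full sort of A by a single linear two-minima scan; A mutates its
-- argument in place (Python dict), B performs the same in-place mutation — the ports and the claim
-- are about the returned dict (as an insertion-ordered association list).

-- ===== PORT A =====
-- while len(clusters) > target: sort items by len, break if < 2, merge first two.
-- The while loop is ported with a fuel of clusters.length + 1, which bounds the number of
-- iterations (each iteration removes two keys and adds one, so at most length - 1 merges).
def pvALoop : Nat → PySem.Dict String (List String) → Int → PySem.Dict String (List String)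
  | 0, d, _ => d
  | fuel + 1, d, target =>
    if (d.size : Int) > target then
      match PySem.List.sorted d.items (fun x => x.2.length) false with
      | c1 :: c2 :: _ =>
        pvALoop fuel (((d.erase c1.1).erase c2.1).insert
          ("merged_" ++ c1.1 ++ "_" ++ c2.1) (c1.2 ++ c2.2)) target
      | _ => d        -- if len(sorted_clusters) < 2: break
    else d

def merge_smallest_clusters_py (clusters : List (String × List String)) (target : Int) : List (String × List String) :=
  (pvALoop (clusters.length + 1) ⟨clusters⟩ target).items

-- ===== PORT B =====
-- one pass over the items keeping the two current minima (by size, ties by position)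
def pvSel (b : (String × List String) × (String × List String)) (item : String × List String) :
    (String × List String) × (String × List String) :=
  if item.2.length < b.1.2.length then (item, b.1)
  else if item.2.length < b.2.2.length then (b.1, item)
  else b

def pvBLoop : Nat → PySem.Dict String (List String) → Int → PySem.Dict String (List String)
  | 0, d, _ => d
  | fuel + 1, d, target =>
    if (d.size : Int) > target ∧ 2 ≤ d.size then
      match d.items with
      | p :: q :: rest =>
        let b := rest.foldl pvSel (if q.2.length < p.2.length then (q, p) else (p, q))
        pvBLoop fuel (((d.erase b.1.1).erase b.2.1).insert
          ("merged_" ++ b.1.1 ++ "_" ++ b.2.1) (b.1.2 ++ b.2.2)) target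
      | _ => d
    else d

def merge_smallest_clusters_py_alt (clusters : List (String × List String)) (target : Int) : List (String × List String) :=
  (pvBLoop (clusters.length + 1) ⟨clusters⟩ target).items

-- ===== PRECONDITION & SPEC =====
def Spec_merge_smallest_clusters_py (clusters : List (String × List String)) (target : Int) (out : List (String × List String)) : Prop := out = merge_smallest_clusters_py_alt clusters target
instance (clusters : List (String × List String)) (target : Int) (out : List (String × List String)) : Decidable (Spec_merge_smallest_clusters_py clusters target out) := by unfold Spec_merge_smallest_clusters_py; infer_instance

-- ===== CLAIM (what is proved, stated in full; the proofs are below) =====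
def Claim_equal_merge_smallest_clusters_py : Prop := ∀ (clusters : List (String × List String)) (target : Int), Dom_merge_smallest_clusters_py clusters target → Spec_merge_smallest_clusters_py clusters target (merge_smallest_clusters_py clusters target)

-- ===== LEMMAS AND PROOFS =====

-- the two-minima scan computes exactly the first two elements of the stable insertion sort
theorem pv_foldl_sel (rest : List (String × List String)) :
    ∀ z1 z2 zs, ∃ t,
      rest.foldl (fun acc x =>
          PySem.List.insertBy (fun a b => decide (a.2.length < b.2.length)) x acc) (z1 :: z2 :: zs)
        = (rest.foldl pvSel (z1, z2)).1 :: (rest.foldl pvSel (z1, z2)).2 :: t := by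
  induction rest with
  | nil => intro z1 z2 zs; exact ⟨zs, rfl⟩
  | cons x r ih =>
    intro z1 z2 zs
    simp only [List.foldl, PySem.List.insertBy, pvSel]
    by_cases h1 : x.2.length < z1.2.length
    · simpa [h1] using ih x z1 (z2 :: zs)
    · by_cases h2 : x.2.length < z2.2.length
      · simpa [h1, h2] using ih z1 x (z2 :: zs)
      · simpa [h1, h2] using ih z1 z2
          (PySem.List.insertBy (fun a b => decide (a.2.length < b.2.length)) x zs)

theorem pv_sorted_two (p q : String × List String) (rest : List (String × List String)) :
    ∃ t, PySem.List.sorted (p :: q :: rest) (fun x => x.2.length) false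
      = (rest.foldl pvSel (if q.2.length < p.2.length then (q, p) else (p, q))).1
        :: (rest.foldl pvSel (if q.2.length < p.2.length then (q, p) else (p, q))).2 :: t := by
  rw [PySem.List.sorted_eq_foldl_insertBy]
  simp only [List.foldl, PySem.List.insertBy]
  by_cases h : q.2.length < p.2.length
  · simpa [h] using pv_foldl_sel rest q p []
  · simpa [h] using pv_foldl_sel rest p q []

theorem pv_loop_eq (fuel : Nat) : ∀ (d : PySem.Dict String (List String)) (target : Int),
    pvALoop fuel d target = pvBLoop fuel d target := by
  induction fuel with
  | zero => intro d target; rfl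
  | succ n ih =>
    intro d target
    obtain ⟨l⟩ := d
    by_cases htgt : ((PySem.Dict.mk l).size : Int) > target
    · match l with
      | [] => simp [pvALoop, pvBLoop, PySem.List.sorted, PySem.Dict.size]
      | [p] => simp [pvALoop, pvBLoop, PySem.List.sorted, PySem.List.insertBy, PySem.Dict.size]
      | p :: q :: rest =>
        obtain ⟨t, hs⟩ := pv_sorted_two p q rest
        have hsz : 2 ≤ (PySem.Dict.mk (p :: q :: rest)).size := by
          simp [PySem.Dict.size]
        simp only [pvALoop, pvBLoop, hs, htgt, hsz, if_pos, and_true]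
        exact ih _ target
    · simp [pvALoop, pvBLoop, htgt]

-- ===== VERDICT (by name: the statement is the Claim_ definition above) =====
theorem merge_smallest_clusters_py_spec : Claim_equal_merge_smallest_clusters_py := by
  intro clusters target _
  unfold Spec_merge_smallest_clusters_py merge_smallest_clusters_py merge_smallest_clusters_py_alt
  rw [pv_loop_eq]
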